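-- pv_equiv track=rewrite | github.com/guyburton/morningstarmidi | morningstar/yaml_converter.py | sysex_text
-- ===== SOURCE A (Python) =====
-- def sysex_text(text: str, field_length: int):
--     data = []
--     for i in range(0, field_length):
--         if text and i < len(text):
--             data.append(ord(text[i]))
--         else:
--             data.append(ord(' '))
--     return data
-- ===== SOURCE B (Python) =====
-- def sysex_text(text: str, field_length: int):
--     # simpler: truncate then pad, one comprehension instead of an index loop with a branch
--     if field_length <= 0:
--         return []
--     s = (text or '')[:field_length]
--     return [ord(c) for c in s.ljust(field_length)]
-- ===== Notes on version B (the rewrite author's own statement) =====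
-- stated objective: simpler
-- what changed: Replaced the per-index loop with a branch inside by two shaped phases: slice the prefix, pad with ljust, then map ord in one comprehension.
import Mathlib
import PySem

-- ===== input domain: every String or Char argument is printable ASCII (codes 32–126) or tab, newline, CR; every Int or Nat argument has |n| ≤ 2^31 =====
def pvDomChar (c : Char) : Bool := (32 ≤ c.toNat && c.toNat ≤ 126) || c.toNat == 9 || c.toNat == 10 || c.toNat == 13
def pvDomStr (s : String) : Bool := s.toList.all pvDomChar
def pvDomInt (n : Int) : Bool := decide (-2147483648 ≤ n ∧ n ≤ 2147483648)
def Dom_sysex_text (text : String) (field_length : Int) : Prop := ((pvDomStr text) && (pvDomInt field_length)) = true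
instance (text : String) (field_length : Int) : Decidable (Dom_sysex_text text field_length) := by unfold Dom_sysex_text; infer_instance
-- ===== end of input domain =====

-- B changes the decomposition only (truncate, pad, map ord instead of an index loop with a branch); same O(field_length) cost.

-- ===== PORT A =====
-- for i in range(0, field_length): append ord(text[i]) if text and i < len(text) else ord(' ')
-- text[i] is ported with pyGetD; the guard 0 ≤ i (from the range) ∧ i < len(text) makes it exact.
def sysex_text (text : String) (field_length : Int) : List Int :=
  (PySem.List.pyRange 0 field_length 1).foldl
    (fun data i =>
      if text.toList ≠ [] ∧ i < (text.toList.length : Int) then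
        data ++ [((PySem.List.pyGetD text.toList i ' ').toNat : Int)]
      else
        data ++ [32]) []

-- ===== PORT B =====
-- if field_length <= 0: []; else s = text[:field_length]; [ord(c) for c in s.ljust(field_length)]
def sysex_text_alt (text : String) (field_length : Int) : List Int :=
  if field_length ≤ 0 then []
  else
    (PySem.List.slice text.toList none (some field_length)
      ++ List.replicate (field_length.toNat - (PySem.List.slice text.toList none (some field_length)).length) ' ').map
      (fun c => (c.toNat : Int))

-- ===== PRECONDITION & SPEC =====
def Spec_sysex_text (text : String) (field_length : Int) (out : List Int) : Prop := out = sysex_text_alt text field_length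
instance (text : String) (field_length : Int) (out : List Int) : Decidable (Spec_sysex_text text field_length out) := by unfold Spec_sysex_text; infer_instance

-- ===== CLAIM (what is proved, stated in full; the proofs are below) =====
def Claim_equal_sysex_text : Prop := ∀ (text : String) (field_length : Int), Dom_sysex_text text field_length → Spec_sysex_text text field_length (sysex_text text field_length)

-- ===== LEMMAS AND PROOFS =====

theorem sysex_text_eq (text : String) (field_length : Int) :
    sysex_text text field_length = sysex_text_alt text field_length := by
  unfold sysex_text sysex_text_alt
  rcases le_or_gt field_length 0 with h | h
  · simp [h]
  · rw [if_neg (by omega)]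
    have hbody : (fun (data : List Int) (i : Int) =>
        if text.toList ≠ [] ∧ i < (text.toList.length : Int) then
          data ++ [((PySem.List.pyGetD text.toList i ' ').toNat : Int)]
        else data ++ [32])
      = fun data i => data ++ [if text.toList ≠ [] ∧ i < (text.toList.length : Int) then
          ((PySem.List.pyGetD text.toList i ' ').toNat : Int) else 32] := by
      funext d i; split <;> rfl
    rw [hbody]
    rw [PySem.List.foldl_append_singleton_eq_map, PySem.List.pyRange_one, List.map_map]
    set L := text.toList with hL
    have hcast : (field_length : Int) = ((field_length.toNat : Nat) : Int) := by omega
    have hslice : PySem.List.slice L none (some field_length) = L.take field_length.toNat := by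
      rw [hcast, PySem.List.slice_to_natCast, Int.toNat_natCast]
    have hlen : (PySem.List.slice L none (some field_length)).length = min field_length.toNat L.length := by
      rw [hslice]; simp [List.length_take]
    apply List.ext_getElem
    · simp [hlen]
    · intro k hk1 hk2
      have hkN : k < field_length.toNat := by simpa using hk1
      simp only [List.nil_append, List.getElem_map, List.getElem_range, Function.comp_apply,
        zero_add]
      by_cases hkl : k < L.length
      · rw [if_pos ⟨by intro he; rw [he] at hkl; simp at hkl, by exact_mod_cast hkl⟩]
        rw [PySem.List.pyGetD_natCast]
        have hk' : k < (PySem.List.slice L none (some field_length)).length := by omega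
        rw [List.getElem_append_left hk']
        simp [hslice, List.getElem_take, List.getD_eq_getElem?_getD,
          List.getElem?_eq_getElem hkl]
      · rw [if_neg (by omega)]
        rw [List.getElem_append_right (by omega)]
        simp

-- ===== VERDICT (by name: the statement is the Claim_ definition above) =====
theorem sysex_text_spec : Claim_equal_sysex_text := by
  intro text field_length _
  exact sysex_text_eq text field_length
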